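-- pv_equiv track=rewrite | github.com/YuJinUk/Algorithm | 프로그래머스/unrated/159994. 카드 뭉치/카드 뭉치.py | solution
-- ===== SOURCE A (Python) =====
-- def solution(cards1, cards2, goal):
--     idx1, idx2 = [], []
--     for i in cards1:
--         if i in goal:
--             idx1.append(goal.index(i))
--         else:
--             idx1.append(len(goal))
--     for i in cards2:
--         if i in goal:
--             idx2.append(goal.index(i))
--         else:
--             idx2.append(len(goal))
--     if idx1 == sorted(idx1) and idx2 == sorted(idx2):
--         return "Yes"
--     else:
--         return "No"
-- ===== SOURCE B (Python) =====
-- def solution(cards1, cards2, goal):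
--     first = {}
--     for j, g in enumerate(goal):
--         first.setdefault(g, j)
--     n = len(goal)
--
--     def monotone(cards):
--         prev = -1
--         for c in cards:
--             v = first.get(c, n)
--             if v < prev:
--                 return False
--             prev = v
--         return True
--
--     return "Yes" if monotone(cards1) and monotone(cards2) else "No"
-- ===== Notes on version B (the rewrite author's own statement) =====
-- stated objective: faster
-- what changed: Replaces A's build-index-lists-then-compare-with-sorted-copy (with an O(n) goal.index scan per card) by a first-index dict built in one pass over goal plus a single running-prev monotonicity scan over each card list, never materialising or sorting index lists.
import Mathlib
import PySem

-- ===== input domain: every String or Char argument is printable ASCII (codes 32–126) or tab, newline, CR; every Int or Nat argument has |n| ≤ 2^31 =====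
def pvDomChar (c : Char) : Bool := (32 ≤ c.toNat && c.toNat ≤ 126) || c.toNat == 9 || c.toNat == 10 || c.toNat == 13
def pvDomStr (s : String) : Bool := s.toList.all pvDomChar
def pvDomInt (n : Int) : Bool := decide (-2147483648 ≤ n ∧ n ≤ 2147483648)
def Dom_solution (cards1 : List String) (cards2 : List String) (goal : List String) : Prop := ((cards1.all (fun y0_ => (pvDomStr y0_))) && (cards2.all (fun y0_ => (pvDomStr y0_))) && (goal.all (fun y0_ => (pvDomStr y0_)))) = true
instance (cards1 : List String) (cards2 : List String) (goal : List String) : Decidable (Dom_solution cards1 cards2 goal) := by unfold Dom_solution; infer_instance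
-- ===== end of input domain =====

-- B replaces A's index-list construction (a goal.index scan per card) and sorted-copy
-- comparison by a first-index dict built once over goal plus a running-prev monotone scan.

-- ===== PORT A =====
-- one loop body: append goal.index(i) if i in goal else len(goal)
def idxStep (goal : List String) (acc : List Int) (i : String) : List Int :=
  if goal.contains i then acc ++ [(((PySem.List.index? goal i).getD 0 : Nat) : Int)]
  else acc ++ [(goal.length : Int)]

def solution (cards1 : List String) (cards2 : List String) (goal : List String) : String :=
  let idx1 := cards1.foldl (idxStep goal) []
  let idx2 := cards2.foldl (idxStep goal) []
  if idx1 = PySem.List.sorted idx1 (fun x => x) false ∧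
     idx2 = PySem.List.sorted idx2 (fun x => x) false then "Yes" else "No"

-- ===== PORT B =====
-- for c in cards: v = first.get(c, n); if v < prev: return False; prev = v
def monotone (first : PySem.Dict String Int) (n : Int) : List String → Int → Bool
  | [], _ => true
  | c :: cs, prev =>
      let v := first.getD c n
      if v < prev then false else monotone first n cs v

def solution_alt (cards1 : List String) (cards2 : List String) (goal : List String) : String :=
  let first := (PySem.List.enumerate goal 0).foldl (fun d p => d.setdefault p.2 p.1) PySem.Dict.empty
  let n : Int := goal.length
  if monotone first n cards1 (-1) && monotone first n cards2 (-1) then "Yes" else "No"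

-- ===== PRECONDITION & SPEC =====
def Spec_solution (cards1 : List String) (cards2 : List String) (goal : List String) (out : String) : Prop := out = solution_alt cards1 cards2 goal
instance (cards1 : List String) (cards2 : List String) (goal : List String) (out : String) : Decidable (Spec_solution cards1 cards2 goal out) := by unfold Spec_solution; infer_instance

-- ===== CLAIM (what is proved, stated in full; the proofs are below) =====
def Claim_equal_solution : Prop := ∀ (cards1 : List String) (cards2 : List String) (goal : List String), Dom_solution cards1 cards2 goal → Spec_solution cards1 cards2 goal (solution cards1 cards2 goal)

-- ===== LEMMAS AND PROOFS =====

-- the common index value: first index of c in goal, or len(goal)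
def fidx (goal : List String) (c : String) : Int :=
  if goal.contains c then (((PySem.List.index? goal c).getD 0 : Nat) : Int) else (goal.length : Int)

theorem fidx_nonneg (goal : List String) (c : String) : 0 ≤ fidx goal c := by
  unfold fidx; split_ifs <;> positivity

-- A's loop builds cards.map (fidx goal)
theorem foldl_idxStep (goal : List String) (cards : List String) (acc : List Int) :
    cards.foldl (idxStep goal) acc = acc ++ cards.map (fidx goal) := by
  induction cards generalizing acc with
  | nil => simp
  | cons c cs ih =>
      simp only [List.foldl_cons, List.map_cons, ih]
      unfold idxStep fidx
      split_ifs <;> simp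

-- B's dict lookup: the setdefault loop over enumerate goal yields first indices
theorem get?_buildFirst (gs : List String) (s : Int) (d : PySem.Dict String Int) (c : String) :
    ((PySem.List.enumerate gs s).foldl (fun d p => d.setdefault p.2 p.1) d).get? c =
      if d.contains c then d.get? c
      else (PySem.List.index? gs c).map (fun k => (s + (k : Nat) : Int)) := by
  induction gs generalizing s d with
  | nil =>
      simp only [PySem.List.enumerate_nil, List.foldl_nil]
      split_ifs with h
      · rfl
      · exact ((PySem.Dict.get?_eq_none_iff_contains d c).mpr (by simpa using h)).trans
          (by simp)
  | cons g gs ih =>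
      rw [PySem.List.enumerate_cons, List.foldl_cons, ih]
      by_cases hc : c = g
      · subst hc
        rw [PySem.List.index?_cons_self]
        have hcont : (d.setdefault c s).contains c = true := by
          rw [PySem.Dict.contains_setdefault]; simp
        rw [if_pos hcont, PySem.Dict.get?_setdefault_self]
        split_ifs with h
        · cases hg : d.get? c with
          | none =>
              exact absurd ((PySem.Dict.get?_eq_none_iff_contains d c).mp hg) (by simp [h])
          | some v => simp
        · have : d.get? c = none :=
            (PySem.Dict.get?_eq_none_iff_contains d c).mpr (by simpa using h)
          simp [this]
      · rw [PySem.Dict.contains_setdefault, PySem.Dict.get?_setdefault_of_ne d s hc,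
            PySem.List.index?_cons_of_ne gs (fun e => hc e.symm)]
        have : (decide (c = g) || d.contains c) = d.contains c := by simp [hc]
        rw [show (c == g) = decide (c = g) from rfl, this]
        split_ifs with h
        · rfl
        · cases hi : PySem.List.index? gs c with
          | none => simp
          | some k =>
              simp only [Option.map_some]
              congr 1
              push_cast
              ring

theorem getD_buildFirst (goal : List String) (c : String) :
    ((PySem.List.enumerate goal 0).foldl (fun d p => d.setdefault p.2 p.1)
        PySem.Dict.empty).getD c (goal.length : Int) = fidx goal c := by
  rw [PySem.Dict.getD_eq_get?_getD, get?_buildFirst goal 0 PySem.Dict.empty c,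
      if_neg (by simp)]
  unfold fidx
  by_cases h : goal.contains c = true
  · rw [if_pos h]
    have hmem : c ∈ goal := by simpa using h
    rcases Option.isSome_iff_exists.mp
      ((PySem.List.index?_isSome_iff goal c).mpr hmem) with ⟨k, hk⟩
    rw [hk]
    simp
  · rw [if_neg h]
    have hmem : c ∉ goal := by simpa using h
    rw [(PySem.List.index?_eq_none_iff goal c).mpr hmem]
    rfl

-- B's scan over cards equals a chain check on the mapped index list
theorem monotone_eq_chain (first : PySem.Dict String Int) (n : Int)
    (cs : List String) (prev : Int) :
    monotone first n cs prev = true ↔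
      List.IsChain (· ≤ ·) (prev :: cs.map (fun c => first.getD c n)) := by
  induction cs generalizing prev with
  | nil => simp [monotone]
  | cons c cs ih =>
      simp only [monotone, List.map_cons, List.isChain_cons_cons]
      split_ifs with h
      · constructor
        · intro hf; exact absurd hf (by simp)
        · rintro ⟨h1, -⟩; omega
      · rw [ih]
        exact ⟨fun hch => ⟨by omega, hch⟩, fun h => h.2⟩

-- A's sorted-copy comparison is exactly pairwise-nondecreasing
theorem eq_sorted_iff_pairwise (l : List Int) :
    l = PySem.List.sorted l (fun x => x) false ↔ l.Pairwise (· ≤ ·) := by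
  constructor
  · intro h
    have hp := PySem.List.sorted_pairwise l (fun x => x)
    rw [← h] at hp
    exact hp
  · intro h
    exact (PySem.List.sorted_eq_self_of_pairwise l (fun x => x) h).symm

-- one card list: A's test ↔ B's scan
theorem side_iff (goal : List String) (cards : List String) :
    (cards.foldl (idxStep goal) [] =
        PySem.List.sorted (cards.foldl (idxStep goal) []) (fun x => x) false) ↔
      monotone ((PySem.List.enumerate goal 0).foldl (fun d p => d.setdefault p.2 p.1)
          PySem.Dict.empty) (goal.length : Int) cards (-1) = true := by
  rw [foldl_idxStep, List.nil_append, eq_sorted_iff_pairwise, monotone_eq_chain]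
  have hmap : cards.map (fun c =>
      ((PySem.List.enumerate goal 0).foldl (fun d p => d.setdefault p.2 p.1)
        PySem.Dict.empty).getD c (goal.length : Int)) = cards.map (fidx goal) := by
    apply List.map_congr_left; intro c _; exact getD_buildFirst goal c
  rw [hmap, List.isChain_iff_pairwise, List.pairwise_cons]
  constructor
  · intro h
    refine ⟨?_, h⟩
    intro x hx
    rcases List.mem_map.mp hx with ⟨c, -, rfl⟩
    have := fidx_nonneg goal c
    omega
  · exact fun h => h.2

-- ===== VERDICT (by name: the statement is the Claim_ definition above) =====
theorem solution_spec : Claim_equal_solution := by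
  intro cards1 cards2 goal _
  unfold Spec_solution
  simp only [solution, solution_alt]
  refine if_congr ?_ rfl rfl
  rw [Bool.and_eq_true]
  exact Iff.and (side_iff goal cards1) (side_iff goal cards2)
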